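-- pv_equiv track=rewrite | github.com/schabusflorian-ui/TabIntelligence | src/extraction/stages/parsing.py | _detect_table_regions
-- ===== SOURCE A (Python) =====
-- from typing import Any, Dict, List, Optional, Set, Tuple
--
-- def _detect_table_regions(
--     rows: List[Dict[str, Any]],
-- ) -> List[Dict[str, int]]:
--     """Detect contiguous data regions separated by 2+ blank rows.
--
--     Returns a list of {start_row, end_row} dicts. If no gaps are
--     found, returns a single region spanning all rows.
--     """
--     if not rows:
--         return []
--
--     indices = sorted(r["row_index"] for r in rows)
--     if not indices:
--         return []
--
--     regions: List[Dict[str, int]] = []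
--     region_start = indices[0]
--
--     for i in range(1, len(indices)):
--         gap = indices[i] - indices[i - 1]
--         if gap >= 3:  # 2+ blank rows between data rows
--             regions.append(
--                 {
--                     "start_row": region_start,
--                     "end_row": indices[i - 1],
--                 }
--             )
--             region_start = indices[i]
--
--     # Close the last region
--     regions.append(
--         {
--             "start_row": region_start,
--             "end_row": indices[-1],
--         }
--     )
--
--     return regions
-- ===== SOURCE B (Python) =====
-- from typing import Any, Dict, List
--
-- def _detect_table_regions(
--     rows: List[Dict[str, Any]],
-- ) -> List[Dict[str, int]]:
--     """Detect contiguous data regions separated by 2+ blank rows.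
--
--     Set-based: a row index starts a region iff neither of the two
--     indices below it is present, and ends one iff neither of the two
--     indices above it is present; the k-th start pairs with the k-th end.
--     """
--     present = {r["row_index"] for r in rows}
--     starts = sorted(x for x in present if x - 1 not in present and x - 2 not in present)
--     ends = sorted(x for x in present if x + 1 not in present and x + 2 not in present)
--     return [{"start_row": s, "end_row": e} for s, e in zip(starts, ends)]
-- ===== Notes on version B (the rewrite author's own statement) =====
-- stated objective: alternative
-- what changed: A sorts the indices and scans adjacent gaps with an accumulator loop carrying the current region start; B never looks at adjacent pairs: it builds a set of indices, selects region starts (x with x-1 and x-2 absent) and region ends (x with x+1 and x+2 absent) by pure membership tests, sorts each and zips the k-th start with the k-th end.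
import Mathlib
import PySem

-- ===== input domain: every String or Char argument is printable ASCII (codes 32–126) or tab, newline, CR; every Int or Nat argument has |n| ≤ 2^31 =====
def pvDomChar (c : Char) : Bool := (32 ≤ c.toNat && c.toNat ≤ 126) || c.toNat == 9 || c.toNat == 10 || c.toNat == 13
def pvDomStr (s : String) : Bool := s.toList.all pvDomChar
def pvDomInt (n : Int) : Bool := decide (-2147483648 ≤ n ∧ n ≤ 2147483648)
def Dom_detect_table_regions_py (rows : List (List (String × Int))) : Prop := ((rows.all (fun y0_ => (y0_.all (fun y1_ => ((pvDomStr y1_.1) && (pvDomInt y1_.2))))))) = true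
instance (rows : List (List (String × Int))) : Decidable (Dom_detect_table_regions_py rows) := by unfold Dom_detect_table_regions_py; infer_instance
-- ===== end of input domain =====

-- B replaces A's sorted-list gap scan by a set of indices: region starts are the indices x
-- with x-1 and x-2 absent, region ends those with x+1 and x+2 absent; sort each and zip.

-- ===== PORT A =====
def detect_table_regions_py (rows : List (List (String × Int))) : List (List (String × Int)) :=
  if rows = [] then []
  else
    let indices := PySem.List.sorted (rows.map (fun r => ((PySem.Dict.mk r).get? "row_index").getD 0)) (fun x => x)
    if indices = [] then []
    else
      let st := (PySem.List.pyRange 1 (indices.length : Int) 1).foldl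
        (fun (acc : List (List (String × Int)) × Int) i =>
          let gap := PySem.List.pyGetD indices i 0 - PySem.List.pyGetD indices (i - 1) 0
          if gap ≥ 3 then
            (acc.1 ++ [[("start_row", acc.2), ("end_row", PySem.List.pyGetD indices (i - 1) 0)]],
             PySem.List.pyGetD indices i 0)
          else acc)
        ([], PySem.List.pyGetD indices 0 0)
      st.1 ++ [[("start_row", st.2), ("end_row", PySem.List.pyGetD indices (-1) 0)]]

-- ===== PORT B =====
-- (iterates the Python set only through membership tests and a key-less sorted, so the
--  unmodelled set iteration order cannot influence the result)
def detect_table_regions_py_alt (rows : List (List (String × Int))) : List (List (String × Int)) :=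
  let present := PySem.Set.ofList (rows.map (fun r => ((PySem.Dict.mk r).get? "row_index").getD 0))
  let starts := PySem.List.sorted
    (present.filter (fun x => !(PySem.Set.contains present (x - 1)) && !(PySem.Set.contains present (x - 2))))
    (fun x => x)
  let ends := PySem.List.sorted
    (present.filter (fun x => !(PySem.Set.contains present (x + 1)) && !(PySem.Set.contains present (x + 2))))
    (fun x => x)
  (starts.zip ends).map (fun p => [("start_row", p.1), ("end_row", p.2)])

-- ===== PRECONDITION & SPEC =====
-- Pre_ excludes rows missing the "row_index" key, on which Python A (and B) raise KeyError.
def Pre_detect_table_regions_py (rows : List (List (String × Int))) : Prop :=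
  ∀ r ∈ rows, ((PySem.Dict.mk r).get? "row_index").isSome = true
instance (rows : List (List (String × Int))) : Decidable (Pre_detect_table_regions_py rows) := by unfold Pre_detect_table_regions_py; infer_instance

def pvWitness_detect_table_regions_py : (List (List (String × Int))) := [[("row_index", 0)], [("row_index", 5)]]

def Spec_detect_table_regions_py (rows : List (List (String × Int))) (out : List (List (String × Int))) : Prop := out = detect_table_regions_py_alt rows
instance (rows : List (List (String × Int))) (out : List (List (String × Int))) : Decidable (Spec_detect_table_regions_py rows out) := by unfold Spec_detect_table_regions_py; infer_instance

-- ===== CLAIM (what is proved, stated in full; the proofs are below) =====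
def Claim_equal_detect_table_regions_py : Prop := ∀ (rows : List (List (String × Int))), Dom_detect_table_regions_py rows → Pre_detect_table_regions_py rows → Spec_detect_table_regions_py rows (detect_table_regions_py rows)

-- ===== LEMMAS AND PROOFS =====

-- abbreviations for the proof (not used by the ports)
def pvMk (p : Int × Int) : List (String × Int) := [("start_row", p.1), ("end_row", p.2)]

def pvStep (acc : List (List (String × Int)) × Int) (p : Int × Int) :
    List (List (String × Int)) × Int :=
  if p.2 - p.1 ≥ 3 then (acc.1 ++ [pvMk (acc.2, p.1)], p.2) else acc

-- the adjacent pairs of xs whose gap splits a region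
def pvGaps (xs : List Int) : List (Int × Int) :=
  (xs.zip xs.tail).filter (fun p => p.2 - p.1 ≥ 3)

theorem pvGaps_cons (x y : Int) (t : List Int) :
    pvGaps (x :: y :: t) = if y - x ≥ 3 then (x, y) :: pvGaps (y :: t) else pvGaps (y :: t) := by
  simp only [pvGaps, List.tail_cons, List.zip_cons_cons, List.filter_cons]
  split_ifs with h <;> simp_all

-- A's accumulator loop over the adjacent pairs, in zip-of-starts-and-ends form
theorem pv_core (ps : List (Int × Int)) (acc : List (List (String × Int))) (s e : Int) :
    (ps.foldl pvStep (acc, s)).1 ++ [pvMk ((ps.foldl pvStep (acc, s)).2, e)]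
      = acc ++ (((s :: (ps.filter (fun p => p.2 - p.1 ≥ 3)).map Prod.snd).zip
          ((ps.filter (fun p => p.2 - p.1 ≥ 3)).map Prod.fst ++ [e])).map pvMk) := by
  induction ps generalizing acc s with
  | nil => simp [pvMk]
  | cons p t ih =>
    by_cases h : p.2 - p.1 ≥ 3
    · simp only [List.foldl_cons, pvStep, List.filter_cons, h, decide_true]
      rw [ih]
      simp
    · simp only [List.foldl_cons, pvStep, List.filter_cons, h, decide_false]
      exact ih acc s

-- the index pairs A reads through range(1, len) are the adjacent pairs of the sorted list
theorem pv_pairs (xs : List Int) :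
    (PySem.List.pyRange 1 (xs.length : Int) 1).map
        (fun i => (PySem.List.pyGetD xs (i - 1) 0, PySem.List.pyGetD xs i 0))
      = xs.zip xs.tail := by
  rw [PySem.List.pyRange_one]
  have hn : ((xs.length : Int) - 1).toNat = xs.length - 1 := by omega
  rw [hn, List.map_map]
  apply List.ext_getElem
  · simp [List.length_zip]
  · intro k h1 h2
    simp only [List.length_map, List.length_range] at h1
    have hk1 : k + 1 < xs.length := by omega
    have hk : k < xs.length := by omega
    have e1 : (1 + (k : Int)) - 1 = ((k : Nat) : Int) := by omega
    have e2 : (1 + (k : Int)) = (((k + 1 : Nat)) : Int) := by omega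
    simp only [List.getElem_map, List.getElem_range, Function.comp_apply]
    rw [e1, e2]
    simp only [PySem.List.pyGetD_natCast, List.getElem_zip, List.getElem_tail]
    rw [List.getD_eq_getElem _ _ hk, List.getD_eq_getElem _ _ hk1]

theorem pvGetNegOne (x : Int) (t : List Int) :
    PySem.List.pyGetD (x :: t) (-1) 0 = (x :: t).getLastD 0 := by
  simp only [PySem.List.pyGetD, PySem.List.pyGet?, PySem.List.pyIdx?]
  norm_num
  rw [List.getLast?_eq_getElem?]
  simp

theorem pvHeadLe (x : Int) (t : List Int) (h : (x :: t).Pairwise (· ≤ ·)) :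
    ∀ a ∈ x :: t, x ≤ a := by
  intro a ha
  rcases List.mem_cons.1 ha with rfl | ha
  · exact le_refl _
  · exact (List.pairwise_cons.1 h).1 a ha

-- every gap-pair second component is well above the head
theorem pvGsGe : ∀ (t : List Int) (x : Int), (x :: t).Pairwise (· ≤ ·) →
    ∀ a ∈ (pvGaps (x :: t)).map Prod.snd, x + 3 ≤ a := by
  intro t
  induction t with
  | nil => intro x _ a ha; simp [pvGaps] at ha
  | cons y t ih =>
    intro x h a ha
    have hxy : x ≤ y := (List.pairwise_cons.1 h).1 y (by simp)
    have h' : (y :: t).Pairwise (· ≤ ·) := (List.pairwise_cons.1 h).2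
    rw [pvGaps_cons] at ha
    split_ifs at ha with hg
    · rcases (by simpa using ha : a = y ∨ a ∈ (pvGaps (y :: t)).map Prod.snd) with rfl | ha'
      · omega
      · have := ih y h' a ha'; omega
    · have := ih y h' a ha; omega

-- membership characterisation of the region starts
theorem pvStartsMem : ∀ (t : List Int) (x : Int), (x :: t).Pairwise (· ≤ ·) → ∀ a : Int,
    (a ∈ x :: (pvGaps (x :: t)).map Prod.snd ↔
      a ∈ x :: t ∧ a - 1 ∉ x :: t ∧ a - 2 ∉ x :: t) := by
  intro t
  induction t with
  | nil =>
    intro x _ a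
    constructor
    · intro ha
      have : a = x := by simpa [pvGaps] using ha
      subst this
      refine ⟨by simp, ?_, ?_⟩ <;> (intro hm; have := List.mem_singleton.1 hm; omega)
    · rintro ⟨h1, -, -⟩
      simp [pvGaps, List.mem_singleton.1 h1]
  | cons y t ih =>
    intro x h a
    have hxy : x ≤ y := (List.pairwise_cons.1 h).1 y (by simp)
    have h' : (y :: t).Pairwise (· ≤ ·) := (List.pairwise_cons.1 h).2
    have hB : ∀ b ∈ y :: t, y ≤ b := pvHeadLe y t h'
    have hS : ∀ b ∈ (pvGaps (y :: t)).map Prod.snd, y + 3 ≤ b := pvGsGe t y h'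
    rw [pvGaps_cons]
    split_ifs with hg
    · -- gap: starts = x :: y :: gs(y::t)
      constructor
      · intro ha
        rcases List.mem_cons.1 ha with rfl | ha
        · refine ⟨by simp, ?_, ?_⟩ <;>
            (intro hm
             rcases List.mem_cons.1 hm with h1 | h1
             · omega
             · have := hB _ h1; omega)
        · obtain ⟨h1, h2, h3⟩ := (ih y h' a).1 ha
          have hya : y ≤ a := hB a h1
          refine ⟨List.mem_cons_of_mem _ h1, ?_, ?_⟩ <;>
            (intro hm
             rcases List.mem_cons.1 hm with h4 | h4
             · omega
             · first | exact h2 h4 | exact h3 h4)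
      · rintro ⟨h1, h2, h3⟩
        rcases List.mem_cons.1 h1 with rfl | h1
        · exact List.mem_cons_self
        · refine List.mem_cons_of_mem _ ((ih y h' a).2 ⟨h1, ?_, ?_⟩) <;>
            (intro hm; first
              | exact h2 (List.mem_cons_of_mem _ hm)
              | exact h3 (List.mem_cons_of_mem _ hm))
    · -- no gap: starts = x :: gs(y::t)
      constructor
      · intro ha
        rcases List.mem_cons.1 ha with rfl | ha
        · refine ⟨by simp, ?_, ?_⟩ <;>
            (intro hm
             rcases List.mem_cons.1 hm with h1 | h1
             · omega
             · have := hB _ h1; omega)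
        · have ha3 : y + 3 ≤ a := hS a ha
          obtain ⟨h1, h2, h3⟩ := (ih y h' a).1 (List.mem_cons_of_mem _ ha)
          refine ⟨List.mem_cons_of_mem _ h1, ?_, ?_⟩ <;>
            (intro hm
             rcases List.mem_cons.1 hm with h4 | h4
             · omega
             · first | exact h2 h4 | exact h3 h4)
      · rintro ⟨h1, h2, h3⟩
        rcases List.mem_cons.1 h1 with rfl | h1
        · exact List.mem_cons_self
        · by_cases hax : a = x
          · subst hax; exact List.mem_cons_self
          · have hya : y ≤ a := hB a h1
            have h2' : a - 1 ∉ y :: t := fun hm => h2 (List.mem_cons_of_mem _ hm)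
            have h3' : a - 2 ∉ y :: t := fun hm => h3 (List.mem_cons_of_mem _ hm)
            have ha3 : y + 3 ≤ a := by
              by_contra hlt
              push Not at hlt
              have hcase : a = y ∨ a = y + 1 ∨ a = y + 2 := by omega
              rcases hcase with rfl | rfl | rfl
              · -- a = y ≠ x, x ≤ y ≤ x + 2 so x = y-1 or y-2
                rcases (by omega : x = a - 1 ∨ x = a - 2) with hx | hx
                · exact h2 (by rw [← hx]; exact List.mem_cons_self)
                · exact h3 (by rw [← hx]; exact List.mem_cons_self)
              · exact h2' (by simp)
              · exact h3' (by simp)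
            have hmem : a ∈ y :: (pvGaps (y :: t)).map Prod.snd :=
              (ih y h' a).2 ⟨h1, h2', h3'⟩
            rcases List.mem_cons.1 hmem with rfl | hmem
            · omega
            · exact List.mem_cons_of_mem _ hmem

-- the region starts are strictly increasing
theorem pvGsLt : ∀ (t : List Int) (x : Int), (x :: t).Pairwise (· ≤ ·) →
    ((pvGaps (x :: t)).map Prod.snd).Pairwise (· < ·) := by
  intro t
  induction t with
  | nil => intro x _; simp [pvGaps]
  | cons y t ih =>
    intro x h
    have h' : (y :: t).Pairwise (· ≤ ·) := (List.pairwise_cons.1 h).2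
    rw [pvGaps_cons]
    split_ifs with hg
    · simp only [List.map_cons]
      exact List.pairwise_cons.2 ⟨fun b hb => by have := pvGsGe t y h' b hb; omega, ih y h'⟩
    · exact ih y h'

theorem pvStartsLt (t : List Int) (x : Int) (h : (x :: t).Pairwise (· ≤ ·)) :
    (x :: (pvGaps (x :: t)).map Prod.snd).Pairwise (· < ·) :=
  List.pairwise_cons.2 ⟨fun b hb => by have := pvGsGe t x h b hb; omega, pvGsLt t x h⟩

-- membership characterisation of the region ends
theorem pvEndsMem : ∀ (t : List Int) (x : Int), (x :: t).Pairwise (· ≤ ·) → ∀ a : Int,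
    (a ∈ (pvGaps (x :: t)).map Prod.fst ++ [(x :: t).getLastD 0] ↔
      a ∈ x :: t ∧ a + 1 ∉ x :: t ∧ a + 2 ∉ x :: t) := by
  intro t
  induction t with
  | nil =>
    intro x _ a
    constructor
    · intro ha
      have : a = x := by simpa [pvGaps] using ha
      subst this
      refine ⟨by simp, ?_, ?_⟩ <;> (intro hm; have := List.mem_singleton.1 hm; omega)
    · rintro ⟨h1, -, -⟩
      simp [pvGaps, List.mem_singleton.1 h1]
  | cons y t ih =>
    intro x h a
    have hxy : x ≤ y := (List.pairwise_cons.1 h).1 y (by simp)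
    have h' : (y :: t).Pairwise (· ≤ ·) := (List.pairwise_cons.1 h).2
    have hB : ∀ b ∈ y :: t, y ≤ b := pvHeadLe y t h'
    have hlast : (x :: y :: t).getLastD 0 = (y :: t).getLastD 0 := by
      simp
    rw [pvGaps_cons, hlast]
    split_ifs with hg
    · -- gap: ends = x :: ends(y::t)
      simp only [List.map_cons, List.cons_append]
      constructor
      · intro ha
        rcases List.mem_cons.1 ha with rfl | ha
        · refine ⟨by simp, ?_, ?_⟩ <;>
            (intro hm
             rcases List.mem_cons.1 hm with h1 | h1
             · omega
             · have := hB _ h1; omega)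
        · obtain ⟨h1, h2, h3⟩ := (ih y h' a).1 ha
          have hya : y ≤ a := hB a h1
          refine ⟨List.mem_cons_of_mem _ h1, ?_, ?_⟩ <;>
            (intro hm
             rcases List.mem_cons.1 hm with h4 | h4
             · omega
             · first | exact h2 h4 | exact h3 h4)
      · rintro ⟨h1, h2, h3⟩
        rcases List.mem_cons.1 h1 with rfl | h1
        · exact List.mem_cons_self
        · refine List.mem_cons_of_mem _ ((ih y h' a).2 ⟨h1, ?_, ?_⟩) <;>
            (intro hm; first
              | exact h2 (List.mem_cons_of_mem _ hm)
              | exact h3 (List.mem_cons_of_mem _ hm))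
    · -- no gap: ends = ends(y::t)
      constructor
      · intro ha
        obtain ⟨h1, h2, h3⟩ := (ih y h' a).1 ha
        have hya : y ≤ a := hB a h1
        refine ⟨List.mem_cons_of_mem _ h1, ?_, ?_⟩ <;>
          (intro hm
           rcases List.mem_cons.1 hm with h4 | h4
           · omega
           · first | exact h2 h4 | exact h3 h4)
      · rintro ⟨h1, h2, h3⟩
        have h2' : a + 1 ∉ y :: t := fun hm => h2 (List.mem_cons_of_mem _ hm)
        have h3' : a + 2 ∉ y :: t := fun hm => h3 (List.mem_cons_of_mem _ hm)
        rcases List.mem_cons.1 h1 with rfl | h1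
        · -- a = x; since x ≤ y ≤ x + 2 and y, y-1∈… forceably y = x
          have hy : y = a := by
            rcases (by omega : y = a ∨ y = a + 1 ∨ y = a + 2) with h4 | h4 | h4
            · exact h4
            · exact absurd (h2 (by rw [← h4]; exact List.mem_cons_of_mem _ List.mem_cons_self)) (fun c => c)
            · exact absurd (h3 (by rw [← h4]; exact List.mem_cons_of_mem _ List.mem_cons_self)) (fun c => c)
          exact (ih y h' a).2 ⟨by simp [hy], h2', h3'⟩
        · exact (ih y h' a).2 ⟨h1, h2', h3'⟩

-- the region ends are strictly increasing
theorem pvEndsLt : ∀ (t : List Int) (x : Int), (x :: t).Pairwise (· ≤ ·) →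
    ((pvGaps (x :: t)).map Prod.fst ++ [(x :: t).getLastD 0]).Pairwise (· < ·) := by
  intro t
  induction t with
  | nil => intro x _; simp [pvGaps]
  | cons y t ih =>
    intro x h
    have hxy : x ≤ y := (List.pairwise_cons.1 h).1 y (by simp)
    have h' : (y :: t).Pairwise (· ≤ ·) := (List.pairwise_cons.1 h).2
    have hB : ∀ b ∈ y :: t, y ≤ b := pvHeadLe y t h'
    have hlast : (x :: y :: t).getLastD 0 = (y :: t).getLastD 0 := by
      simp
    rw [pvGaps_cons, hlast]
    split_ifs with hg
    · simp only [List.map_cons, List.cons_append]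
      refine List.pairwise_cons.2 ⟨?_, ih y h'⟩
      intro b hb
      have hbm : b ∈ y :: t := ((pvEndsMem t y h' b).1 hb).1
      have := hB b hbm
      omega
    · exact ih y h'

-- A as zip of starts and ends over the sorted index list
theorem pv_A_form (rows : List (List (String × Int))) (hr : rows ≠ [])
    (x : Int) (t : List Int)
    (hxs : PySem.List.sorted (rows.map (fun r => ((PySem.Dict.mk r).get? "row_index").getD 0)) (fun v => v) = x :: t) :
    detect_table_regions_py rows
      = (((x :: (pvGaps (x :: t)).map Prod.snd).zip
          ((pvGaps (x :: t)).map Prod.fst ++ [(x :: t).getLastD 0])).map pvMk) := by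
  unfold detect_table_regions_py
  simp only [if_neg hr]
  rw [hxs]
  rw [if_neg (by simp)]
  have hfold :
      (PySem.List.pyRange 1 ((x :: t).length : Int) 1).foldl
        (fun (acc : List (List (String × Int)) × Int) i =>
          let gap := PySem.List.pyGetD (x :: t) i 0 - PySem.List.pyGetD (x :: t) (i - 1) 0
          if gap ≥ 3 then
            (acc.1 ++ [[("start_row", acc.2), ("end_row", PySem.List.pyGetD (x :: t) (i - 1) 0)]],
             PySem.List.pyGetD (x :: t) i 0)
          else acc)
        ([], PySem.List.pyGetD (x :: t) 0 0)
      = ((x :: t).zip ((x :: t)).tail).foldl pvStep ([], PySem.List.pyGetD (x :: t) 0 0) := by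
    rw [← pv_pairs (x :: t), List.foldl_map]
    rfl
  rw [hfold]
  have h0 : PySem.List.pyGetD (x :: t) 0 0 = x := by
    exact_mod_cast PySem.List.pyGetD_natCast (x :: t) 0 0
  rw [pvGetNegOne x t, h0]
  exact pv_core ((x :: t).zip (x :: t).tail) [] x ((x :: t).getLastD 0)

theorem pv_main (rows : List (List (String × Int))) :
    detect_table_regions_py rows = detect_table_regions_py_alt rows := by
  by_cases hr : rows = []
  · subst hr; rfl
  · set l := rows.map (fun r => ((PySem.Dict.mk r).get? "row_index").getD 0) with hl
    obtain ⟨x, t, hxs⟩ : ∃ x t, PySem.List.sorted l (fun v => v) = x :: t := by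
      rcases hxs : PySem.List.sorted l (fun v => v) with _ | ⟨x, t⟩
      · exact absurd ((PySem.List.sorted_eq_nil_iff l (fun v => v) false).1 hxs)
          (by simpa [hl] using hr)
      · exact ⟨x, t, rfl⟩
    have hsorted : (x :: t).Pairwise (· ≤ ·) := by
      have := PySem.List.sorted_pairwise l (fun v => v)
      rw [hxs] at this
      exact this
    have hpm : ∀ a : Int, a ∈ PySem.Set.ofList l ↔ a ∈ x :: t := by
      intro a
      rw [PySem.Set.mem_ofList, ← PySem.List.mem_sorted l (fun v => v) false, hxs]
    -- B's sorted filtered starts and ends coincide with A's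
    have hstarts :
        PySem.List.sorted
          ((PySem.Set.ofList l).filter
            (fun v => !(PySem.Set.contains (PySem.Set.ofList l) (v - 1)) &&
                      !(PySem.Set.contains (PySem.Set.ofList l) (v - 2))))
          (fun v => v)
        = x :: (pvGaps (x :: t)).map Prod.snd := by
      apply PySem.List.sorted_eq_of_perm_of_pairwise_lt
      · rw [List.perm_ext_iff_of_nodup
            ((pvStartsLt t x hsorted).imp (fun h => ne_of_lt h))
            (List.Nodup.filter _ (PySem.Set.nodup_ofList l))]
        intro a
        rw [pvStartsMem t x hsorted a, List.mem_filter]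
        simp only [PySem.Set.contains, Bool.and_eq_true, Bool.not_eq_true',
          List.contains_eq_mem, decide_eq_false_iff_not, hpm]
      · exact pvStartsLt t x hsorted
    have hends :
        PySem.List.sorted
          ((PySem.Set.ofList l).filter
            (fun v => !(PySem.Set.contains (PySem.Set.ofList l) (v + 1)) &&
                      !(PySem.Set.contains (PySem.Set.ofList l) (v + 2))))
          (fun v => v)
        = (pvGaps (x :: t)).map Prod.fst ++ [(x :: t).getLastD 0] := by
      apply PySem.List.sorted_eq_of_perm_of_pairwise_lt
      · rw [List.perm_ext_iff_of_nodup
            ((pvEndsLt t x hsorted).imp (fun h => ne_of_lt h))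
            (List.Nodup.filter _ (PySem.Set.nodup_ofList l))]
        intro a
        rw [pvEndsMem t x hsorted a, List.mem_filter]
        simp only [PySem.Set.contains, Bool.and_eq_true, Bool.not_eq_true',
          List.contains_eq_mem, decide_eq_false_iff_not, hpm]
      · exact pvEndsLt t x hsorted
    rw [pv_A_form rows hr x t hxs]
    have hBeq : detect_table_regions_py_alt rows =
        ((PySem.List.sorted
            ((PySem.Set.ofList l).filter
              (fun v => !(PySem.Set.contains (PySem.Set.ofList l) (v - 1)) &&
                        !(PySem.Set.contains (PySem.Set.ofList l) (v - 2))))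
            (fun v => v)).zip
          (PySem.List.sorted
            ((PySem.Set.ofList l).filter
              (fun v => !(PySem.Set.contains (PySem.Set.ofList l) (v + 1)) &&
                        !(PySem.Set.contains (PySem.Set.ofList l) (v + 2))))
            (fun v => v))).map (fun p => [("start_row", p.1), ("end_row", p.2)]) := rfl
    rw [hBeq, hstarts, hends]
    rfl

-- ===== VERDICT (by name: the statement is the Claim_ definition above) =====
theorem detect_table_regions_py_spec : Claim_equal_detect_table_regions_py := by
  intro rows _ _
  exact pv_main rows
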